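-- pv_equiv track=rewrite | github.com/sarwadnyjawale/voxar | engine/tests/test_day3_stress.py | generate_hindi_test_text
-- ===== SOURCE A (Python) =====
-- def generate_hindi_test_text(char_count):
--     """Generate Hindi Devanagari test text of approximate length."""
--     base = (
--         "वोक्सार प्रीमियम ए आई वॉइस टेक्नोलॉजी बना रहा है। "
--         "हमारा प्लेटफॉर्म कई भाषाओं और आवाज शैलियों को सपोर्ट करता है। "
--         "कंटेंट क्रिएटर्स स्टूडियो क्वालिटी वॉइसओवर बना सकते हैं। "
--         "इंजन एडवांस्ड न्यूरल नेटवर्क मॉडल का उपयोग करता है। "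
--         "हर आउटपुट प्रोफेशनल ऑडियो मास्टरिंग से गुजरता है। "
--     )
--     text = ""
--     while len(text) < char_count:
--         text += base
--     return text[:char_count]
-- ===== SOURCE B (Python) =====
-- def generate_hindi_test_text(char_count):
--     """Generate Hindi Devanagari test text of approximate length."""
--     base = (
--         "वोक्सार प्रीमियम ए आई वॉइस टेक्नोलॉजी बना रहा है। "
--         "हमारा प्लेटफॉर्म कई भाषाओं और आवाज शैलियों को सपोर्ट करता है। "
--         "कंटेंट क्रिएटर्स स्टूडियो क्वालिटी वॉइसओवर बना सकते हैं। "
--         "इंजन एडवांस्ड न्यूरल नेटवर्क मॉडल का उपयोग करता है। "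
--         "हर आउटपुट प्रोफेशनल ऑडियो मास्टरिंग से गुजरता है। "
--     )
--     reps = char_count // len(base) + 1
--     return (base * reps)[:char_count]
-- ===== Notes on version B (the rewrite author's own statement) =====
-- stated objective: faster
-- what changed: Replaces the while-loop of repeated string concatenations with a closed form: the repeat count is computed arithmetically (char_count // len(base) + 1) and the text is built by one string multiplication and one slice.
import Mathlib
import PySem

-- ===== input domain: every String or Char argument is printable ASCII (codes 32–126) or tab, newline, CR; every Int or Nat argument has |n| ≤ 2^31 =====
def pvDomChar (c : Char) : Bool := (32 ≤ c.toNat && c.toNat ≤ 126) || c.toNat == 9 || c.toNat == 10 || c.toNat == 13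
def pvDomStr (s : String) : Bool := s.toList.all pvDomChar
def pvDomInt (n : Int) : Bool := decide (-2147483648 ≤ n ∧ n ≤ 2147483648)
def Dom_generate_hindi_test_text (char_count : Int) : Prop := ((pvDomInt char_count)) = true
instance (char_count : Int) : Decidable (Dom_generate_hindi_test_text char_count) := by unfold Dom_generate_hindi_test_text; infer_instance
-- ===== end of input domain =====

-- B replaces A's quadratic while-loop concatenation with an arithmetic repeat count and one multiply-and-slice.

-- ===== PORT A =====
-- the literal `base` string of A (Python len = code points = List Char length)
def pvBaseA : List Char := "वोक्सार प्रीमियम ए आई वॉइस टेक्नोलॉजी बना रहा है। हमारा प्लेटफॉर्म कई भाषाओं और आवाज शैलियों को सपोर्ट करता है। कंटेंट क्रिएटर्स स्टूडियो क्वालिटी वॉइसओवर बना सकते हैं। इंजन एडवांस्ड न्यूरल नेटवर्क मॉडल का उपयोग करता है। हर आउटपुट प्रोफेशनल ऑडियो मास्टरिंग से गुजरता है। ".toList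

-- the `while len(text) < char_count: text += base` loop of A
-- needed by pvLoopA's termination proof, hence stated before it
set_option maxRecDepth 8000 in
lemma pvBase_len_pos : 0 < pvBaseA.length := by simp [pvBaseA]

def pvLoopA (char_count : Int) (text : List Char) : List Char :=
  if (text.length : Int) < char_count then
    pvLoopA char_count (text ++ pvBaseA)
  else text
termination_by (char_count - text.length).toNat
decreasing_by
  have hb : 0 < pvBaseA.length := pvBase_len_pos
  simp only [List.length_append]
  omega

def generate_hindi_test_text (char_count : Int) : String :=
  String.ofList (PySem.List.slice (pvLoopA char_count []) none (some char_count))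

-- ===== PORT B =====
def pvBaseB : List Char := "वोक्सार प्रीमियम ए आई वॉइस टेक्नोलॉजी बना रहा है। हमारा प्लेटफॉर्म कई भाषाओं और आवाज शैलियों को सपोर्ट करता है। कंटेंट क्रिएटर्स स्टूडियो क्वालिटी वॉइसओवर बना सकते हैं। इंजन एडवांस्ड न्यूरल नेटवर्क मॉडल का उपयोग करता है। हर आउटपुट प्रोफेशनल ऑडियो मास्टरिंग से गुजरता है। ".toList

def generate_hindi_test_text_alt (char_count : Int) : String :=
  -- reps = char_count // len(base) + 1
  let reps : Int := PySem.Int.floordiv char_count (pvBaseB.length : Int) + 1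
  -- base * reps (Python string multiplication: empty for reps <= 0), then [:char_count]
  String.ofList (PySem.List.slice (List.replicate reps.toNat pvBaseB).flatten none (some char_count))

-- ===== PRECONDITION & SPEC =====
def Spec_generate_hindi_test_text (char_count : Int) (out : String) : Prop := out = generate_hindi_test_text_alt char_count
instance (char_count : Int) (out : String) : Decidable (Spec_generate_hindi_test_text char_count out) := by unfold Spec_generate_hindi_test_text; infer_instance

-- ===== CLAIM (what is proved, stated in full; the proofs are below) =====
def Claim_equal_generate_hindi_test_text : Prop := ∀ (char_count : Int), Dom_generate_hindi_test_text char_count → Spec_generate_hindi_test_text char_count (generate_hindi_test_text char_count)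

-- ===== LEMMAS AND PROOFS =====

lemma pvBase_eq : pvBaseB = pvBaseA := rfl

-- n copies of base
def pvRep (n : Nat) : List Char := (List.replicate n pvBaseA).flatten

lemma pvRep_add (a c : Nat) : pvRep (a + c) = pvRep a ++ pvRep c := by
  rw [pvRep, pvRep, pvRep, List.replicate_add, List.flatten_append]

lemma pvRep_succ (n : Nat) : pvRep (n + 1) = pvRep n ++ pvBaseA := by
  simp [pvRep, List.replicate_succ']

lemma pvRep_len (n : Nat) : (pvRep n).length = n * pvBaseA.length := by
  induction n with
  | zero => simp [pvRep]
  | succ k ih => rw [pvRep_succ]; simp [ih, Nat.succ_mul]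

-- the loop, started on any whole number of copies, ends on a whole number of copies long enough
lemma pvLoopA_rep (cc : Int) (k : Nat) :
    ∃ n : Nat, k ≤ n ∧ pvLoopA cc (pvRep k) = pvRep n ∧ cc ≤ ((pvRep n).length : Int) := by
  by_cases h : ((pvRep k).length : Int) < cc
  · obtain ⟨n, hkn, hl, hle⟩ := pvLoopA_rep cc (k + 1)
    refine ⟨n, by omega, ?_, hle⟩
    rw [pvLoopA, if_pos h, ← pvRep_succ, hl]
  · exact ⟨k, le_refl _, by rw [pvLoopA, if_neg h], by omega⟩
termination_by (cc - (pvRep k).length).toNat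
decreasing_by
  have hb := pvBase_len_pos
  rw [pvRep_succ]
  simp only [List.length_append]
  omega

-- prefixes of repetitions agree as long as the take stays inside the smaller one
lemma pvRep_take (a b m : Nat) (hab : a ≤ b) (hm : m ≤ a * pvBaseA.length) :
    (pvRep b).take m = (pvRep a).take m := by
  have hb : b = a + (b - a) := by omega
  rw [hb, pvRep_add, List.take_append_of_le_length (by rw [pvRep_len]; exact hm)]

-- ===== VERDICT (by name: the statement is the Claim_ definition above) =====
theorem generate_hindi_test_text_spec : Claim_equal_generate_hindi_test_text := by
  intro cc _
  unfold Spec_generate_hindi_test_text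
  simp only [generate_hindi_test_text, generate_hindi_test_text_alt, pvBase_eq]
  set L : Int := (pvBaseA.length : Int) with hL
  have hLpos : (0:Int) < L := by rw [hL]; exact_mod_cast pvBase_len_pos
  have hfd : PySem.Int.floordiv cc L = cc / L := by
    rw [PySem.Int.floordiv, Int.fdiv_eq_ediv, if_pos (Or.inl (le_of_lt hLpos))]; ring
  by_cases hcc : 0 < cc
  · -- A: the loop ends on pvRep n with cc ≤ n*L; B: pvRep reps.toNat with cc ≤ reps*L
    obtain ⟨n, _, hloop, hlen⟩ := pvLoopA_rep cc 0
    have hA : pvLoopA cc [] = pvRep n := by simpa [pvRep] using hloop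
    set reps : Int := PySem.Int.floordiv cc L + 1 with hreps
    have hrpos : 0 < reps := by
      have h0 : 0 ≤ cc / L := Int.ediv_nonneg (le_of_lt hcc) (le_of_lt hLpos)
      rw [hreps, hfd]; omega
    have hccr : cc ≤ reps * L := by
      have hlt := Int.lt_ediv_add_one_mul_self cc hLpos
      rw [hreps, hfd]; exact le_of_lt hlt
    have hBrep : (List.replicate reps.toNat pvBaseA).flatten = pvRep reps.toNat := rfl
    rw [hA, hBrep,
        PySem.List.slice_to _ (le_of_lt hcc), PySem.List.slice_to _ (le_of_lt hcc)]
    have hrepsN : (reps.toNat : Int) = reps := Int.toNat_of_nonneg (le_of_lt hrpos)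
    have h1 : cc.toNat ≤ n * pvBaseA.length := by
      rw [pvRep_len] at hlen; omega
    have h2 : cc.toNat ≤ reps.toNat * pvBaseA.length := by
      have he : ((reps.toNat * pvBaseA.length : Nat) : Int) = reps * L := by
        push_cast [hrepsN]; rw [hL]
      have hle : (cc.toNat : Int) ≤ ((reps.toNat * pvBaseA.length : Nat) : Int) := by
        rw [he]; omega
      exact_mod_cast hle
    rcases le_total n reps.toNat with hmn | hmn
    · rw [pvRep_take n reps.toNat cc.toNat hmn h1]
    · rw [pvRep_take reps.toNat n cc.toNat hmn h2]
  · -- cc ≤ 0: A's loop never runs; B's repetition is empty (cc < 0) or the slice takes nothing (cc = 0)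
    have hA : pvLoopA cc [] = [] := by
      rw [pvLoopA, if_neg (by simp; omega)]
    rw [hA]
    rcases lt_or_eq_of_le (not_lt.mp hcc) with hlt | heq
    · have hq : cc / L < 0 := by
        by_contra hcon
        push Not at hcon
        have hnn : 0 ≤ L * (cc / L) := mul_nonneg (le_of_lt hLpos) hcon
        have hdm := Int.mul_ediv_add_emod cc L
        have hr0 := Int.emod_nonneg cc (ne_of_gt hLpos)
        linarith
      have hr : (PySem.Int.floordiv cc L + 1).toNat = 0 := by
        rw [hfd]; omega
      rw [hr]
      simp [PySem.List.slice]
    · subst heq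
      rw [PySem.List.slice_to _ (le_refl 0), PySem.List.slice_to _ (le_refl 0)]
      simp
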